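-- pv_equiv track=rewrite | github.com/Ryanbastian123/IBUSCRIBE | backend/services/clinical_llm.py | _build_intake_context
-- ===== SOURCE A (Python) =====
-- def _build_intake_context(intake: dict) -> str:
--     """Format patient intake form data as a readable context block."""
--     lines = ["=== PATIENT INTAKE FORM (Self-reported) ==="]
--     if intake.get("chief_complaint"):
--         lines.append(f"Chief complaint: {intake['chief_complaint']}")
--     if intake.get("symptom_duration"):
--         lines.append(f"Duration: {intake['symptom_duration']}")
--     if intake.get("symptom_severity"):
--         lines.append(f"Severity (patient-reported): {intake['symptom_severity']}")
--     if intake.get("symptoms_detail"):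
--         lines.append(f"Symptom details: {intake['symptoms_detail']}")
--     if intake.get("current_medications"):
--         lines.append(f"Current medications: {intake['current_medications']}")
--     if intake.get("known_allergies"):
--         lines.append(f"Known allergies: {intake['known_allergies']}")
--     if intake.get("past_history"):
--         lines.append(f"Past medical history: {intake['past_history']}")
--
--     has_data = any(intake.get(k) for k in intake)
--     if not has_data:
--         return "(No patient intake form data provided)"
--
--     return "\n".join(lines)
-- ===== SOURCE B (Python) =====
-- _ORDER = {
--     "chief_complaint": (0, "Chief complaint"),
--     "symptom_duration": (1, "Duration"),
--     "symptom_severity": (2, "Severity (patient-reported)"),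
--     "symptoms_detail": (3, "Symptom details"),
--     "current_medications": (4, "Current medications"),
--     "known_allergies": (5, "Known allergies"),
--     "past_history": (6, "Past medical history"),
-- }
--
--
-- def _build_intake_context(intake: dict) -> str:
--     """Format patient intake form data as a readable context block."""
--     entries = []
--     has_data = False
--     for key, value in intake.items():
--         if value:
--             has_data = True
--             if key in _ORDER:
--                 rank, label = _ORDER[key]
--                 entries.append((rank, f"{label}: {value}"))
--     if not has_data:
--         return "(No patient intake form data provided)"
--     entries.sort(key=lambda e: e[0])
--     return "\n".join(
--         ["=== PATIENT INTAKE FORM (Self-reported) ==="] + [line for _, line in entries]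
--     )
-- ===== Notes on version B (the rewrite author's own statement) =====
-- stated objective: alternative
-- what changed: Instead of seven per-field dict lookups feeding unrolled conditional appends, B makes a single pass over the dict's items, collecting (rank, line) pairs via a key->(rank,label) table and a has_data flag, then sorts the collected entries by rank and joins; correct because dict keys are unique, so sorting by table rank reproduces the fixed field order.
import Mathlib
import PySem

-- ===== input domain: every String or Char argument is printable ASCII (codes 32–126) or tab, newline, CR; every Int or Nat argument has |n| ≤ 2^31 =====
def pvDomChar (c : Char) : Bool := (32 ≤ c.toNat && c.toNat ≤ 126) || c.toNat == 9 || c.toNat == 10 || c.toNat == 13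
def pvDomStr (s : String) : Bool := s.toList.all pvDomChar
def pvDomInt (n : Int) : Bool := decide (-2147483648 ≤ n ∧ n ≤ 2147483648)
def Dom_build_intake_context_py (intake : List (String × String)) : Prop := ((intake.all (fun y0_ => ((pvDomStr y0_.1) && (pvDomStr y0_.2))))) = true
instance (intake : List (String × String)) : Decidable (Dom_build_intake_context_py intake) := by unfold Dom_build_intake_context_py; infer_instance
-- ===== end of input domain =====

-- B replaces A's seven per-field lookups and unrolled if/append branches by a single pass over the
-- dict's items collecting (rank, line) pairs via a rank table, then sorting by rank (objective: alternative).


-- ===== PORT A =====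
-- A's `intake.get(k)` truthiness test is `getD k "" ≠ ""` (missing key → None, falsy; empty string falsy);
-- `intake[k]` after a passed truthiness test is the same `getD k ""`.
def build_intake_context_py (intake : List (String × String)) : String :=
  let d := PySem.Dict.ofList intake
  let lines := ["=== PATIENT INTAKE FORM (Self-reported) ==="]
  let lines := if d.getD "chief_complaint" "" ≠ "" then
    lines ++ ["Chief complaint: " ++ d.getD "chief_complaint" ""] else lines
  let lines := if d.getD "symptom_duration" "" ≠ "" then
    lines ++ ["Duration: " ++ d.getD "symptom_duration" ""] else lines
  let lines := if d.getD "symptom_severity" "" ≠ "" then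
    lines ++ ["Severity (patient-reported): " ++ d.getD "symptom_severity" ""] else lines
  let lines := if d.getD "symptoms_detail" "" ≠ "" then
    lines ++ ["Symptom details: " ++ d.getD "symptoms_detail" ""] else lines
  let lines := if d.getD "current_medications" "" ≠ "" then
    lines ++ ["Current medications: " ++ d.getD "current_medications" ""] else lines
  let lines := if d.getD "known_allergies" "" ≠ "" then
    lines ++ ["Known allergies: " ++ d.getD "known_allergies" ""] else lines
  let lines := if d.getD "past_history" "" ≠ "" then
    lines ++ ["Past medical history: " ++ d.getD "past_history" ""] else lines
  let has_data := d.keys.any (fun k => d.getD k "" ≠ "")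
  if !has_data then "(No patient intake form data provided)"
  else PySem.Str.join "\n" lines

-- ===== PORT B =====
-- B's rank table `_ORDER`.
def pvFieldRank : PySem.Dict String (Int × String) :=
  PySem.Dict.ofList
    [("chief_complaint", (0, "Chief complaint")),
     ("symptom_duration", (1, "Duration")),
     ("symptom_severity", (2, "Severity (patient-reported)")),
     ("symptoms_detail", (3, "Symptom details")),
     ("current_medications", (4, "Current medications")),
     ("known_allergies", (5, "Known allergies")),
     ("past_history", (6, "Past medical history"))]

-- one pass over the dict items accumulating (entries, has_data), then sort entries by rank and join
def build_intake_context_py_alt (intake : List (String × String)) : String :=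
  let d := PySem.Dict.ofList intake
  let st := d.items.foldl
    (fun (st : List (Int × String) × Bool) kv =>
      if kv.2 ≠ "" then
        ((match pvFieldRank.get? kv.1 with
          | some rl => st.1 ++ [(rl.1, rl.2 ++ ": " ++ kv.2)]
          | none => st.1), true)
      else st)
    ([], false)
  if !st.2 then "(No patient intake form data provided)"
  else
    PySem.Str.join "\n"
      ("=== PATIENT INTAKE FORM (Self-reported) ===" ::
        (PySem.List.sorted st.1 (fun e => e.1) false).map (fun e => e.2))

-- ===== PRECONDITION & SPEC =====
def Spec_build_intake_context_py (intake : List (String × String)) (out : String) : Prop := out = build_intake_context_py_alt intake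
instance (intake : List (String × String)) (out : String) : Decidable (Spec_build_intake_context_py intake out) := by unfold Spec_build_intake_context_py; infer_instance

-- ===== CLAIM =====
def Claim_equal_build_intake_context_py : Prop := ∀ (intake : List (String × String)), Dom_build_intake_context_py intake → Spec_build_intake_context_py intake (build_intake_context_py intake)

-- ===== LEMMAS AND PROOFS =====

-- B's per-item entry function, key predicate and entry builder (proof-only helpers)
def pvF (kv : String × String) : Option (Int × String) :=
  if kv.2 ≠ "" then (pvFieldRank.get? kv.1).map (fun rl => (rl.1, rl.2 ++ ": " ++ kv.2)) else none

def pvP (d : PySem.Dict String String) (k : String) : Bool :=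
  (pvFieldRank.get? k).isSome && decide (d.getD k "" ≠ "")

def pvG (d : PySem.Dict String String) (k : String) : Int × String :=
  match pvFieldRank.get? k with
  | some rl => (rl.1, rl.2 ++ ": " ++ d.getD k "")
  | none => (0, "")

def pvTK : List String := pvFieldRank.keys

-- B's fold over the items splits into a filterMap (the entries) and an any (has_data)
theorem pvFoldSpec (l : List (String × String)) (acc : List (Int × String)) (b : Bool) :
    l.foldl
      (fun (st : List (Int × String) × Bool) kv =>
        if kv.2 ≠ "" then
          ((match pvFieldRank.get? kv.1 with
            | some rl => st.1 ++ [(rl.1, rl.2 ++ ": " ++ kv.2)]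
            | none => st.1), true)
        else st)
      (acc, b)
    = (acc ++ l.filterMap pvF, b || l.any (fun kv => kv.2 ≠ "")) := by
  induction l generalizing acc b with
  | nil => simp
  | cons hd tl ih =>
    simp only [List.foldl_cons]
    by_cases h : hd.2 = ""
    · rw [if_neg (by simp [h]), ih]
      simp [pvF, h]
    · rw [if_pos h]
      cases hpv : pvFieldRank.get? hd.1 <;> simp only [hpv] <;> rw [ih] <;>
        simp [pvF, h, hpv, List.append_assoc]

theorem pvFilterMapE (d : PySem.Dict String String) (l : List String) :
    l.filterMap (pvF ∘ fun k => (k, d.getD k "")) = (l.filter (pvP d)).map (pvG d) := by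
  induction l with
  | nil => rfl
  | cons hd tl ih =>
    by_cases h : d.getD hd "" = ""
    · rw [List.filterMap_cons_none (by simp [pvF, h]), ih, List.filter_cons,
          if_neg (by simp [pvP, h])]
    · cases hpv : pvFieldRank.get? hd with
      | none =>
        rw [List.filterMap_cons_none (by simp [pvF, hpv]), ih, List.filter_cons,
            if_neg (by simp [pvP, hpv])]
      | some rl =>
        rw [List.filterMap_cons_some (by simp [pvF, h, hpv] :
              (pvF ∘ fun k => (k, d.getD k "")) hd = some (rl.1, rl.2 ++ ": " ++ d.getD hd "")),
            ih, List.filter_cons, if_pos (by simp [pvP, h, hpv]), List.map_cons]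
        congr 1
        simp [pvG, hpv]

theorem pvSortEq (d : PySem.Dict String String) (hnd : d.keys.Nodup) :
    PySem.List.sorted ((d.keys.filter (pvP d)).map (pvG d)) (fun e => e.1) false
      = (pvTK.filter (pvP d)).map (pvG d) := by
  apply PySem.List.sorted_eq_of_perm_of_pairwise_lt
  · -- permutation: keys order vs table order
    apply List.Perm.map
    rw [List.perm_ext_iff_of_nodup (List.Nodup.filter _ (by decide : pvTK.Nodup))
        (List.Nodup.filter _ hnd)]
    intro a
    simp only [List.mem_filter]
    constructor
    · rintro ⟨_, hp⟩
      refine ⟨?_, hp⟩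
      by_contra hmem
      have hc : d.contains a = false := by
        by_contra hcc
        exact hmem (((PySem.Dict.contains_iff_mem_keys d a)).mp (by
          cases hh : d.contains a
          · exact absurd hh hcc
          · rfl))
      have := PySem.Dict.getD_of_not_contains d "" hc
      simp [pvP, this] at hp
    · rintro ⟨_, hp⟩
      refine ⟨?_, hp⟩
      by_contra hmem
      have : pvFieldRank.get? a = none := (PySem.Dict.get?_eq_none_iff_not_mem_keys _ _).mpr hmem
      simp [pvP, this] at hp
  · -- ranks strictly increase along the (filtered) table
    rw [List.pairwise_map, ← List.pairwise_map (f := fun k => (pvG d k).1)]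
    exact List.Pairwise.sublist (List.Sublist.map _ List.filter_sublist)
      (by
        have h7 : pvTK.map (fun k => (pvG d k).1) = ([0, 1, 2, 3, 4, 5, 6] : List Int) := rfl
        rw [h7]; decide)

theorem pvAnyEq (d : PySem.Dict String String) (hnd : d.keys.Nodup) :
    (d.items.any fun kv => decide (kv.2 ≠ "")) = d.keys.any fun k => decide (d.getD k "" ≠ "") := by
  rw [PySem.Dict.items_eq_map_keys d hnd "", List.any_map]
  rfl

-- ===== VERDICT =====
set_option maxHeartbeats 4000000 in
theorem build_intake_context_py_spec : Claim_equal_build_intake_context_py := by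
  intro intake _
  unfold Spec_build_intake_context_py build_intake_context_py build_intake_context_py_alt
  dsimp only
  have hnd : (PySem.Dict.ofList intake).keys.Nodup := PySem.Dict.nodup_keys_ofList intake
  rw [pvFoldSpec]
  rw [pvAnyEq _ hnd]
  rw [PySem.Dict.items_eq_map_keys (PySem.Dict.ofList intake) hnd ""]
  rw [List.filterMap_map, pvFilterMapE]
  simp only [List.nil_append, Bool.false_or]
  rw [pvSortEq _ hnd]
  by_cases h : ((PySem.Dict.ofList intake).keys.any fun k => decide ((PySem.Dict.ofList intake).getD k "" ≠ "")) = true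
  · simp only [h, Bool.not_true, Bool.false_eq_true, if_false]
    have htk : pvTK = ["chief_complaint", "symptom_duration", "symptom_severity",
        "symptoms_detail", "current_medications", "known_allergies", "past_history"] := rfl
    have p1 : pvP (PySem.Dict.ofList intake) "chief_complaint" = decide ((PySem.Dict.ofList intake).getD "chief_complaint" "" ≠ "") := rfl
    have p2 : pvP (PySem.Dict.ofList intake) "symptom_duration" = decide ((PySem.Dict.ofList intake).getD "symptom_duration" "" ≠ "") := rfl
    have p3 : pvP (PySem.Dict.ofList intake) "symptom_severity" = decide ((PySem.Dict.ofList intake).getD "symptom_severity" "" ≠ "") := rfl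
    have p4 : pvP (PySem.Dict.ofList intake) "symptoms_detail" = decide ((PySem.Dict.ofList intake).getD "symptoms_detail" "" ≠ "") := rfl
    have p5 : pvP (PySem.Dict.ofList intake) "current_medications" = decide ((PySem.Dict.ofList intake).getD "current_medications" "" ≠ "") := rfl
    have p6 : pvP (PySem.Dict.ofList intake) "known_allergies" = decide ((PySem.Dict.ofList intake).getD "known_allergies" "" ≠ "") := rfl
    have p7 : pvP (PySem.Dict.ofList intake) "past_history" = decide ((PySem.Dict.ofList intake).getD "past_history" "" ≠ "") := rfl
    have g1 : pvG (PySem.Dict.ofList intake) "chief_complaint" = (0, "Chief complaint: " ++ (PySem.Dict.ofList intake).getD "chief_complaint" "") := rfl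
    have g2 : pvG (PySem.Dict.ofList intake) "symptom_duration" = (1, "Duration: " ++ (PySem.Dict.ofList intake).getD "symptom_duration" "") := rfl
    have g3 : pvG (PySem.Dict.ofList intake) "symptom_severity" = (2, "Severity (patient-reported): " ++ (PySem.Dict.ofList intake).getD "symptom_severity" "") := rfl
    have g4 : pvG (PySem.Dict.ofList intake) "symptoms_detail" = (3, "Symptom details: " ++ (PySem.Dict.ofList intake).getD "symptoms_detail" "") := rfl
    have g5 : pvG (PySem.Dict.ofList intake) "current_medications" = (4, "Current medications: " ++ (PySem.Dict.ofList intake).getD "current_medications" "") := rfl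
    have g6 : pvG (PySem.Dict.ofList intake) "known_allergies" = (5, "Known allergies: " ++ (PySem.Dict.ofList intake).getD "known_allergies" "") := rfl
    have g7 : pvG (PySem.Dict.ofList intake) "past_history" = (6, "Past medical history: " ++ (PySem.Dict.ofList intake).getD "past_history" "") := rfl
    rw [htk]
    split_ifs <;>
      (refine congrArg (PySem.Str.join "\n") ?_
       simp_all [List.filter_cons, List.filter_nil, p1, p2, p3, p4, p5, p6, p7,
         g1, g2, g3, g4, g5, g6, g7])
  · simp only [Bool.not_eq_true] at h
    simp only [h, Bool.not_false]
    rfl
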